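-- pv_equiv track=rewrite | github.com/prendradjaja/advent-of-code-past | 1519/count_generation_size.py | get_next_generation
-- ===== SOURCE A (Python) =====
-- def get_next_generation(curr_generation, rules):
--     generated = set()
--     for molecule in curr_generation:
--         for i, atom in enumerate(molecule):
--             for left, right in rules:
--                 if left == atom:
--                     generated.add(molecule[:i] + right + molecule[i+1:])
--     return generated
-- ===== SOURCE B (Python) =====
-- def get_next_generation(curr_generation, rules):
--     # Zipper traversal: walk each molecule with (prefix, suffix) accumulators
--     # instead of enumerate+index slicing; emit prefix + right + rest directly.
--     generated = set()
--     for molecule in curr_generation: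
--         prefix, suffix = "", molecule
--         while suffix:
--             atom, rest = suffix[0], suffix[1:]
--             for right in [r for l, r in rules if l == atom]:
--                 generated.add(prefix + right + rest)
--             prefix += atom
--             suffix = rest
--     return generated
-- ===== Notes on version B (the rewrite author's own statement) =====
-- stated objective: alternative
-- what changed: B replaces A's enumerate-index-and-slice scan by a zipper traversal that walks each molecule maintaining (prefix, suffix) string accumulators and emits prefix + right + rest, with the matching right-hand sides selected by a filtering comprehension; no indices or slicing are used.
import Mathlib
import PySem

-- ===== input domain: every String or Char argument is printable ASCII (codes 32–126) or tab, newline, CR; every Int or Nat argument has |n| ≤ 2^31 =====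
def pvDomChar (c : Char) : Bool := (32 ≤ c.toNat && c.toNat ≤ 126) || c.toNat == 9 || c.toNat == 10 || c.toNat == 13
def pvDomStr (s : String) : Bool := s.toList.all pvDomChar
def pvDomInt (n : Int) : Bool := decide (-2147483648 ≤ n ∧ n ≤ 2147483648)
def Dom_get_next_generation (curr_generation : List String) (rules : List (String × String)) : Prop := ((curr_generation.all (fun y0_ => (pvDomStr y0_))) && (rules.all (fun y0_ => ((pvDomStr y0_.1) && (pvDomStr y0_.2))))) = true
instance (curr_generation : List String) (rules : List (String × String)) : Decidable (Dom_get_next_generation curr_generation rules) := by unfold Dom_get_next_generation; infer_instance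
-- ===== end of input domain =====

-- B walks each molecule as a zipper with (prefix, suffix) accumulators instead of enumerate + slicing (objective: alternative).
-- ===== PORT A =====
def get_next_generation (curr_generation : List String) (rules : List (String × String)) : List String :=
  curr_generation.foldl (fun gen molecule =>
    (PySem.List.enumerate molecule.toList 0).foldl (fun gen ia =>
      rules.foldl (fun gen lr =>
        if lr.1 == String.ofList [ia.2] then
          PySem.Set.add gen (String.ofList (PySem.List.slice molecule.toList none (some ia.1) ++ lr.2.toList ++ PySem.List.slice molecule.toList (some (ia.1 + 1)) none))
        else gen) gen) gen) PySem.Set.empty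

-- ===== PORT B =====
-- B's while loop over (prefix, suffix) ported as structural recursion on the suffix.
def get_next_generation_altLoop (rules : List (String × String)) (pfx : List Char) (suffix : List Char) (gen : List String) : List String :=
  match suffix with
  | [] => gen
  | atom :: rest =>
    let gen' := ((rules.filter (fun lr => lr.1 == String.ofList [atom])).map (·.2)).foldl
      (fun g right => PySem.Set.add g (String.ofList (pfx ++ right.toList ++ rest))) gen
    get_next_generation_altLoop rules (pfx ++ [atom]) rest gen'

def get_next_generation_alt (curr_generation : List String) (rules : List (String × String)) : List String :=
  curr_generation.foldl (fun gen molecule =>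
    get_next_generation_altLoop rules [] molecule.toList gen) PySem.Set.empty

-- ===== PRECONDITION & SPEC =====
def Spec_get_next_generation (curr_generation : List String) (rules : List (String × String)) (out : List String) : Prop := out = get_next_generation_alt curr_generation rules
instance (curr_generation : List String) (rules : List (String × String)) (out : List String) : Decidable (Spec_get_next_generation curr_generation rules out) := by unfold Spec_get_next_generation; infer_instance

-- ===== CLAIM (what is proved, stated in full; the proofs are below) =====
def Claim_equal_get_next_generation : Prop := ∀ (curr_generation : List String) (rules : List (String × String)), Dom_get_next_generation curr_generation rules → Spec_get_next_generation curr_generation rules (get_next_generation curr_generation rules)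

-- ===== LEMMAS AND PROOFS =====
theorem inner_eq (rules : List (String × String)) (p : List Char) (atom : Char) (rest : List Char)
    (gen : List String) :
    rules.foldl (fun g lr =>
        if lr.1 == String.ofList [atom] then
          PySem.Set.add g (String.ofList (PySem.List.slice (p ++ atom :: rest) none (some ((p.length : Int))) ++ lr.2.toList ++ PySem.List.slice (p ++ atom :: rest) (some ((p.length : Int) + 1)) none))
        else g) gen
      = ((rules.filter (fun lr => lr.1 == String.ofList [atom])).map (·.2)).foldl
          (fun g right => PySem.Set.add g (String.ofList (p ++ right.toList ++ rest))) gen := by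
  rw [PySem.List.foldl_if_eq_foldl_filter, List.foldl_map]
  have h1 : PySem.List.slice (p ++ atom :: rest) none (some ((p.length : Int))) = p := by
    rw [PySem.List.slice_to_natCast, List.take_left]
  have h2 : PySem.List.slice (p ++ atom :: rest) (some ((p.length : Int) + 1)) none = rest := by
    have : ((p.length : Int) + 1) = (((p.length + 1 : Nat)) : Int) := by push_cast; ring
    rw [this, PySem.List.slice_from_natCast]
    rw [show p.length + 1 = (p ++ [atom]).length by simp]
    rw [show p ++ atom :: rest = (p ++ [atom]) ++ rest by simp]
    exact List.drop_left ..
  rw [h1, h2]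

theorem loop_eq (rules : List (String × String)) (s p : List Char) (gen : List String) :
    (PySem.List.enumerate s ((p.length : Int))).foldl (fun gen ia =>
      rules.foldl (fun gen lr =>
        if lr.1 == String.ofList [ia.2] then
          PySem.Set.add gen (String.ofList (PySem.List.slice (p ++ s) none (some ia.1) ++ lr.2.toList ++ PySem.List.slice (p ++ s) (some (ia.1 + 1)) none))
        else gen) gen) gen
      = get_next_generation_altLoop rules p s gen := by
  induction s generalizing p gen with
  | nil => simp [PySem.List.enumerate, get_next_generation_altLoop]
  | cons atom rest ih =>
    rw [PySem.List.enumerate_cons, List.foldl_cons]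
    simp only [get_next_generation_altLoop]
    rw [inner_eq]
    have hlen : (p.length : Int) + 1 = (((p ++ [atom]).length : Nat) : Int) := by
      simp
    have hm : p ++ atom :: rest = (p ++ [atom]) ++ rest := by simp
    rw [hlen, hm]
    exact ih (p ++ [atom]) _

-- ===== VERDICT (by name: the statement is the Claim_ definition above) =====
theorem get_next_generation_spec : Claim_equal_get_next_generation := by
  intro curr rules _
  unfold Spec_get_next_generation get_next_generation get_next_generation_alt
  apply PySem.List.foldl_congr_mem
  intro gen molecule _
  have := loop_eq rules molecule.toList [] gen
  simpa using this
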